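-- pv_equiv track=rewrite | github.com/Fastlanedevs/blogmaster_ai_slack | test.py | parse_post_ideas
-- ===== SOURCE A (Python) =====
-- def parse_post_ideas(ideas_text):
--     ideas = {"blog": [], "linkedin": [], "twitter": []}
--     current_platform = None
--     for line in ideas_text.split('\n'):
--         line = line.strip()
--         if line.endswith("Ideas:"):
--             current_platform = line.lower().split()[0]
--         elif line and current_platform:
--             # Remove the number at the beginning of the idea
--             idea = line.split('. ', 1)[-1] if '. ' in line else line
--             ideas[current_platform].append(idea)
--     return ideas
-- ===== SOURCE B (Python) =====
-- def _clean(line):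
--     return line.split('. ', 1)[-1] if '. ' in line else line
--
--
-- def _split_section(lines):
--     # body lines up to (but excluding) the next header, plus the remainder
--     # starting at that header.
--     for i, l in enumerate(lines):
--         if l.endswith("Ideas:"):
--             return lines[:i], lines[i:]
--     return lines, []
--
--
-- def parse_post_ideas(ideas_text):
--     lines = [l.strip() for l in ideas_text.split('\n')]
--     ideas = {"blog": [], "linkedin": [], "twitter": []}
--     _, rest = _split_section(lines)  # discard everything before the first header
--     while rest:
--         header, tail = rest[0], rest[1:]
--         body, rest = _split_section(tail)
--         ideas[header.lower().split()[0]] += [_clean(l) for l in body if l]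
--     return ideas
-- ===== Notes on version B (the rewrite author's own statement) =====
-- stated objective: alternative
-- what changed: B replaces A's stateful line-by-line loop (dict + current_platform flag) by a section-wise decomposition: it repeatedly splits the stripped lines at the next 'Ideas:' header and appends each whole section body to its platform's list at once.
-- outside the precondition, e.g. on parse_post_ideas('foo Ideas:'): A returns {'blog': [], 'linkedin': [], 'twitter': []}, B raises KeyError; on parse_post_ideas('Ideas:'): A returns {'blog': [], 'linkedin': [], 'twitter': []}, B raises KeyError; on parse_post_ideas('foo Ideas:\n1. x'): A raises KeyError, B raises KeyError
import Mathlib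
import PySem

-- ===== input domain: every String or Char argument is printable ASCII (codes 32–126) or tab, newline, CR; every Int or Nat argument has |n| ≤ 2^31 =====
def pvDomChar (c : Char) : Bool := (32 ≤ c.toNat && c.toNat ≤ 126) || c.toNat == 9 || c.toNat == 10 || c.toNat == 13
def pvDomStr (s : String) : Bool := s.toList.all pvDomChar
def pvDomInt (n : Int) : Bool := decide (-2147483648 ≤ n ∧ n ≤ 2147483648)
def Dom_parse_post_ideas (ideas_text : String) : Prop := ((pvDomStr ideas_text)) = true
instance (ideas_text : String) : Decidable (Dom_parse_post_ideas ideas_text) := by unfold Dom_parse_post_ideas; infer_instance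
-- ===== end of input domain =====

-- B re-parses by repeatedly splitting the stripped lines at header lines into whole sections
-- (alternative decomposition: span/recursion over sections instead of A's stateful line-by-line loop).


-- ===== PORT A =====
-- idea = line.split('. ', 1)[-1] if '. ' in line else line
-- (the split result is always nonempty, so the [-1] never raises; getLastD is its idle default)
def pyIdea (line : String) : String :=
  if PySem.Str.isIn ". " line then ((PySem.Str.splitMax? line ". " 1).getD []).getLastD ""
  else line

-- loop body of A on an already-stripped line; state = (ideas, current_platform)
-- line.lower().split()[0]: a header line is nonempty after strip, so split() is nonempty and
-- [0] never raises; headD is its idle default.  ideas[current_platform].append(idea) raises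
-- KeyError when the platform is unknown — excluded by Pre_ below; modify is its idle stand-in.
def paStepS (st : PySem.Dict String (List String) × Option String) (line : String) :
    PySem.Dict String (List String) × Option String :=
  if PySem.Str.endswith line "Ideas:" then
    (st.1, some ((PySem.Str.split₀ (PySem.Str.lower line)).headD ""))
  else
    match st.2 with
    | some p => if line = "" then st else (st.1.modify p [] (· ++ [pyIdea line]), st.2)
    | none => st

def paStep (st : PySem.Dict String (List String) × Option String) (line0 : String) :
    PySem.Dict String (List String) × Option String :=
  paStepS st (PySem.Str.strip line0)

def parse_post_ideas (ideas_text : String) : List (String × List String) :=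
  let ideas0 : PySem.Dict String (List String) :=
    ((PySem.Dict.empty.insert "blog" []).insert "linkedin" []).insert "twitter" []
  (((PySem.Str.split? ideas_text "\n").getD []).foldl paStep (ideas0, none)).1.items

-- ===== PORT B =====
-- _split_section: body lines up to (excluding) the next header, plus the remainder from it
def pbSplitSection : List String → List String × List String
  | [] => ([], [])
  | l :: ls =>
    if PySem.Str.endswith l "Ideas:" then ([], l :: ls)
    else
      let br := pbSplitSection ls
      (l :: br.1, br.2)

theorem pbSplitSection_snd_length_le : ∀ ls : List String, (pbSplitSection ls).2.length ≤ ls.length := by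
  intro ls
  induction ls with
  | nil => simp [pbSplitSection]
  | cons l ls ih =>
    simp only [pbSplitSection]
    split
    · simp
    · simpa using Nat.le_succ_of_le ih

-- the while loop of B: rest = [] → done; else consume one header + its section body
def pbGo (ideas : PySem.Dict String (List String)) : List String → PySem.Dict String (List String)
  | [] => ideas
  | header :: tail =>
    let br := pbSplitSection tail
    pbGo (ideas.modify ((PySem.Str.split₀ (PySem.Str.lower header)).headD "") []
      (· ++ (br.1.filter (fun l => !(l == ""))).map pyIdea)) br.2
  termination_by rest => rest.length
  decreasing_by
    simp only [List.length_cons]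
    exact Nat.lt_succ_of_le (pbSplitSection_snd_length_le tail)

def parse_post_ideas_alt (ideas_text : String) : List (String × List String) :=
  let lines := ((PySem.Str.split? ideas_text "\n").getD []).map PySem.Str.strip
  let ideas0 : PySem.Dict String (List String) :=
    ((PySem.Dict.empty.insert "blog" []).insert "linkedin" []).insert "twitter" []
  (pbGo ideas0 (pbSplitSection lines).2).items

-- ===== PRECONDITION & SPEC =====
-- Pre_ excludes texts containing a (stripped) header line whose lowercased first word is not one of
-- blog/linkedin/twitter: there A raises KeyError as soon as any idea line follows such a header
-- (and returns the untouched dict otherwise), while B raises KeyError on any such header.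
def Pre_parse_post_ideas (ideas_text : String) : Prop :=
  ∀ l ∈ (PySem.Str.split? ideas_text "\n").getD [],
    PySem.Str.endswith (PySem.Str.strip l) "Ideas:" = true →
      ((PySem.Str.split₀ (PySem.Str.lower (PySem.Str.strip l))).headD "") ∈
        (["blog", "linkedin", "twitter"] : List String)
instance (ideas_text : String) : Decidable (Pre_parse_post_ideas ideas_text) := by
  unfold Pre_parse_post_ideas; infer_instance

def pvWitness_parse_post_ideas : String :=
  "intro text\nBlog Ideas:\n1. First idea\n2. Second one\n\nTwitter Ideas:\nshort tweet"

def Spec_parse_post_ideas (ideas_text : String) (out : List (String × List String)) : Prop := out = parse_post_ideas_alt ideas_text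
instance (ideas_text : String) (out : List (String × List String)) : Decidable (Spec_parse_post_ideas ideas_text out) := by unfold Spec_parse_post_ideas; infer_instance

-- ===== CLAIM (what is proved, stated in full; the proofs are below) =====
def Claim_equal_parse_post_ideas : Prop := ∀ (ideas_text : String), Dom_parse_post_ideas ideas_text → Pre_parse_post_ideas ideas_text → Spec_parse_post_ideas ideas_text (parse_post_ideas ideas_text)

-- ===== LEMMAS AND PROOFS =====

-- proof-only name for the initial three-key dict shared by both ports
def pvD0 : PySem.Dict String (List String) :=
  ((PySem.Dict.empty.insert "blog" []).insert "linkedin" []).insert "twitter" []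

theorem dict_insert_getD_self (d : PySem.Dict String (List String)) (p : String)
    (h : d.contains p = true) (hnd : d.keys.Nodup) :
    d.insert p (d.getD p []) = d := by
  apply PySem.Dict.ext
  have hk : (d.insert p (d.getD p [])).keys = d.keys :=
    PySem.Dict.keys_insert_of_contains d (d.getD p []) h
  have hnd' : (d.insert p (d.getD p [])).keys.Nodup := by rw [hk]; exact hnd
  rw [PySem.Dict.items_eq_map_keys _ hnd' [], PySem.Dict.items_eq_map_keys d hnd [], hk]
  apply List.map_congr_left
  intro k _
  rw [PySem.Dict.getD_insert]
  split <;> simp_all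

theorem dict_modify_id (d : PySem.Dict String (List String)) (p : String)
    (h : d.contains p = true) (hnd : d.keys.Nodup) :
    d.modify p [] (fun v => v ++ []) = d := by
  show d.insert p (d.getD p [] ++ []) = d
  rw [List.append_nil]
  exact dict_insert_getD_self d p h hnd

theorem dict_modify_modify (d : PySem.Dict String (List String)) (p : String)
    (f g : List String → List String) :
    (d.modify p [] f).modify p [] g = d.modify p [] (fun v => g (f v)) := by
  show (d.insert p (f (d.getD p []))).insert p (g ((d.insert p (f (d.getD p []))).getD p [])) = _
  rw [PySem.Dict.getD_insert_self, PySem.Dict.insert_insert_self]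
  rfl

theorem dict_keys_modify_mem (d : PySem.Dict String (List String)) (p : String)
    (f : List String → List String) (h : d.contains p = true) :
    (d.modify p [] f).keys = d.keys := by
  rw [PySem.Dict.keys_modify]
  exact PySem.Dict.keys_insert_of_contains d _ h

theorem dict_contains_modify_mem (d : PySem.Dict String (List String)) (p q : String)
    (f : List String → List String) (h : d.contains p = true) :
    (d.modify p [] f).contains q = d.contains q := by
  rw [PySem.Dict.contains_eq_decide_mem_keys, PySem.Dict.contains_eq_decide_mem_keys,
    dict_keys_modify_mem d p f h]

-- the stateful loop from state (d, some p) computes one whole section at once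
theorem foldl_some (ls : List String) :
    ∀ (d : PySem.Dict String (List String)) (p : String),
    d.keys.Nodup → d.contains p = true →
    (∀ l ∈ ls, PySem.Str.endswith l "Ideas:" = true →
      d.contains ((PySem.Str.split₀ (PySem.Str.lower l)).headD "") = true) →
    (ls.foldl paStepS (d, some p)).1 =
      pbGo (d.modify p []
        (· ++ ((pbSplitSection ls).1.filter (fun l => !(l == ""))).map pyIdea))
        (pbSplitSection ls).2 := by
  induction ls with
  | nil =>
    intro d p hnd hp _
    simp only [List.foldl_nil, pbSplitSection, List.filter_nil, List.map_nil]
    rw [dict_modify_id d p hp hnd, pbGo]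
  | cons l ls ih =>
    intro d p hnd hp hks
    by_cases hh : PySem.Str.endswith l "Ideas:" = true
    · simp only [List.foldl_cons, paStepS, hh, if_pos, pbSplitSection,
        List.filter_nil, List.map_nil]
      rw [ih d ((PySem.Str.split₀ (PySem.Str.lower l)).headD "") hnd
        (hks l (List.mem_cons_self) hh) (fun l' hl' => hks l' (List.mem_cons_of_mem _ hl'))]
      rw [dict_modify_id d p hp hnd, pbGo]
    · by_cases hl : l = ""
      · subst hl
        simp only [List.foldl_cons, paStepS, hh, if_neg, Bool.false_eq_true, not_false_iff]
        simp only [pbSplitSection, hh, if_neg, Bool.false_eq_true, not_false_iff,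
          List.filter_cons, beq_self_eq_true, Bool.not_true]
        simp only [if_pos]
        exact ih d p hnd hp (fun l' hl' => hks l' (List.mem_cons_of_mem _ hl'))
      · have hstep : paStepS (d, some p) l =
            (d.modify p [] (· ++ [pyIdea l]), some p) := by
          unfold paStepS
          rw [if_neg hh]
          dsimp only
          rw [if_neg hl]
        have hsplit : pbSplitSection (l :: ls) =
            (l :: (pbSplitSection ls).1, (pbSplitSection ls).2) := by
          simp only [pbSplitSection]
          rw [if_neg hh]
        rw [List.foldl_cons, hstep, hsplit,
          ih (d.modify p [] (· ++ [pyIdea l])) p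
            (by rw [dict_keys_modify_mem d p _ hp]; exact hnd)
            (by rw [dict_contains_modify_mem d p p _ hp]; exact hp)
            (fun l' hl' hh' => by
              rw [dict_contains_modify_mem d p _ _ hp]
              exact hks l' (List.mem_cons_of_mem _ hl') hh'),
          dict_modify_modify]
        have hfil : List.filter (fun x => !(x == "")) (l :: (pbSplitSection ls).1) =
            l :: List.filter (fun x => !(x == "")) (pbSplitSection ls).1 := by
          simp [hl]
        dsimp only
        rw [hfil, List.map_cons]
        exact congrArg (fun f => pbGo (d.modify p [] f) (pbSplitSection ls).2)
          (by funext v; simp)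

-- the stateful loop from the initial (d, none) state = skip preamble, then sections
theorem foldl_none (ls : List String) :
    ∀ (d : PySem.Dict String (List String)),
    d.keys.Nodup →
    (∀ l ∈ ls, PySem.Str.endswith l "Ideas:" = true →
      d.contains ((PySem.Str.split₀ (PySem.Str.lower l)).headD "") = true) →
    (ls.foldl paStepS (d, none)).1 = pbGo d (pbSplitSection ls).2 := by
  induction ls with
  | nil =>
    intro d _ _
    simp only [List.foldl_nil, pbSplitSection]
    rw [pbGo]
  | cons l ls ih =>
    intro d hnd hks
    by_cases hh : PySem.Str.endswith l "Ideas:" = true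
    · simp only [List.foldl_cons, paStepS, hh, if_pos, pbSplitSection]
      rw [foldl_some ls d ((PySem.Str.split₀ (PySem.Str.lower l)).headD "") hnd
        (hks l (List.mem_cons_self) hh) (fun l' hl' => hks l' (List.mem_cons_of_mem _ hl'))]
      rw [pbGo]
    · have hstep : paStepS (d, none) l = (d, none) := by
        unfold paStepS
        rw [if_neg hh]
      have hsplit : pbSplitSection (l :: ls) =
          (l :: (pbSplitSection ls).1, (pbSplitSection ls).2) := by
        simp only [pbSplitSection]
        rw [if_neg hh]
      rw [List.foldl_cons, hstep, hsplit]
      exact ih d hnd (fun l' hl' => hks l' (List.mem_cons_of_mem _ hl'))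

theorem parse_post_ideas_spec : Claim_equal_parse_post_ideas := by
  intro ideas_text _ hpre
  show parse_post_ideas ideas_text = parse_post_ideas_alt ideas_text
  show (((PySem.Str.split? ideas_text "\n").getD []).foldl paStep (pvD0, none)).1.items =
    (pbGo pvD0
      (pbSplitSection (((PySem.Str.split? ideas_text "\n").getD []).map PySem.Str.strip)).2).items
  congr 1
  rw [show (((PySem.Str.split? ideas_text "\n").getD []).foldl paStep (pvD0, none)) =
      ((((PySem.Str.split? ideas_text "\n").getD []).map PySem.Str.strip).foldl paStepS
        (pvD0, none)) from by rw [List.foldl_map]; rfl]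
  apply foldl_none
  · decide
  · intro l' hl' hh'
    rcases List.mem_map.mp hl' with ⟨l, hl, rfl⟩
    have hm := hpre l hl hh'
    simp only [List.mem_cons, List.not_mem_nil, or_false] at hm
    rcases hm with h | h | h <;> rw [h] <;> decide
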